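-- pv_equiv track=rewrite | github.com/jakeryderv/ml-market | src/data.py | get_feature_categories
-- ===== SOURCE A (Python) =====
-- def get_feature_categories(features):
--     """Categorize features by prefix."""
--     categories = {
--         "Returns": [],
--         "Trend": [],
--         "Momentum": [],
--         "Volatility": [],
--         "Volume": [],
--         "Pattern": [],
--         "VIX": [],
--         "CBOE": [],
--         "FixedIncome": [],
--         "CrossAsset": [],
--         "Sector": [],
--         "Other": [],
--     }
--
--     prefix_map = {
--         "ret_": "Returns",
--         "trend_": "Trend",
--         "mom_": "Momentum",
--         "vol_": "Volatility",
--         "vlm_": "Volume",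
--         "pat_": "Pattern",
--         "vix_": "VIX",
--         "cboe_": "CBOE",
--         "fi_": "FixedIncome",
--         "xa_": "CrossAsset",
--         "sect_": "Sector",
--     }
--
--     for feat in features:
--         categorized = False
--         for prefix, category in prefix_map.items():
--             if feat.startswith(prefix):
--                 categories[category].append(feat)
--                 categorized = True
--                 break
--         if not categorized:
--             categories["Other"].append(feat)
--
--     categories = {k: v for k, v in categories.items() if v}
--
--     return categories
-- ===== SOURCE B (Python) =====
-- def get_feature_categories(features):
--     """Categorize features by prefix."""
--     prefix_map = {
--         "ret_": "Returns",
--         "trend_": "Trend",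
--         "mom_": "Momentum",
--         "vol_": "Volatility",
--         "vlm_": "Volume",
--         "pat_": "Pattern",
--         "vix_": "VIX",
--         "cboe_": "CBOE",
--         "fi_": "FixedIncome",
--         "xa_": "CrossAsset",
--         "sect_": "Sector",
--     }
--     order = ["Returns", "Trend", "Momentum", "Volatility", "Volume", "Pattern",
--              "VIX", "CBOE", "FixedIncome", "CrossAsset", "Sector", "Other"]
--     buckets = {name: [] for name in order}
--     for feat in features:
--         head, sep, _ = feat.partition("_")
--         key = head + "_"
--         cat = prefix_map[key] if sep == "_" and key in prefix_map else "Other"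
--         buckets[cat].append(feat)
--     return {k: v for k, v in buckets.items() if v}
-- ===== Notes on version B (the rewrite author's own statement) =====
-- stated objective: faster
-- what changed: B replaces A's inner scan over the 11-entry prefix table (startswith per entry, with a 'categorized' flag and break) by one computed-key lookup: it partitions each feature at its first '_' and looks head+'_' up in the prefix dict once.
import Mathlib
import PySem

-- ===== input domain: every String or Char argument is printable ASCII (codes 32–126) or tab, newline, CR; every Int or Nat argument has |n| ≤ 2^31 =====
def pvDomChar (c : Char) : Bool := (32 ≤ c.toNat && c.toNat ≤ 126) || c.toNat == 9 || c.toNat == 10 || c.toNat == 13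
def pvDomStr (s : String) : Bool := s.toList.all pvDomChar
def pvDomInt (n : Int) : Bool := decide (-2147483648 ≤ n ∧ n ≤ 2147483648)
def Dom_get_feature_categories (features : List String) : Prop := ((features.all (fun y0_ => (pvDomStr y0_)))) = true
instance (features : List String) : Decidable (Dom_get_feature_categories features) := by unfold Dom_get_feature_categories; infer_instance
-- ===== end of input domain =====

-- B categorizes each feature by ONE computed-key dict lookup on the text before its first '_'
-- instead of A's scan of the 11 prefixes; return value only (neither program mutates its argument).

-- ===== PORT A =====
def gA_prefixItems : List (String × String) :=
  [("ret_", "Returns"), ("trend_", "Trend"), ("mom_", "Momentum"), ("vol_", "Volatility"),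
   ("vlm_", "Volume"), ("pat_", "Pattern"), ("vix_", "VIX"), ("cboe_", "CBOE"),
   ("fi_", "FixedIncome"), ("xa_", "CrossAsset"), ("sect_", "Sector")]

def gA_cats0 : PySem.Dict String (List String) :=
  PySem.Dict.ofList [("Returns", []), ("Trend", []), ("Momentum", []), ("Volatility", []),
   ("Volume", []), ("Pattern", []), ("VIX", []), ("CBOE", []), ("FixedIncome", []),
   ("CrossAsset", []), ("Sector", []), ("Other", [])]

-- the inner 'for prefix, category in prefix_map.items(): … break' plus the trailing 'if not categorized'
def gA_inner (feat : String) (cats : PySem.Dict String (List String)) :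
    List (String × String) → PySem.Dict String (List String)
  | [] => cats.modify "Other" [] (· ++ [feat])
  | (p, c) :: rest =>
      if PySem.Str.startswith feat p then cats.modify c [] (· ++ [feat])
      else gA_inner feat cats rest

def get_feature_categories (features : List String) : List (String × List String) :=
  ((features.foldl (fun cats feat => gA_inner feat cats gA_prefixItems) gA_cats0).items).filter
    (fun kv => !kv.2.isEmpty)

-- ===== PORT B =====
-- exact port of Python's str.partition(sep) for the single-character separator '_'
def gB_partition_ (s : String) : String × String × String :=
  let l := s.toList
  if '_' ∈ l then
    (String.ofList (l.takeWhile (fun c => c != '_')), "_",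
     String.ofList ((l.dropWhile (fun c => c != '_')).drop 1))
  else (s, "", "")

def gB_prefixMap : PySem.Dict String String :=
  PySem.Dict.ofList
    [("ret_", "Returns"), ("trend_", "Trend"), ("mom_", "Momentum"), ("vol_", "Volatility"),
     ("vlm_", "Volume"), ("pat_", "Pattern"), ("vix_", "VIX"), ("cboe_", "CBOE"),
     ("fi_", "FixedIncome"), ("xa_", "CrossAsset"), ("sect_", "Sector")]

def gB_order : List String :=
  ["Returns", "Trend", "Momentum", "Volatility", "Volume", "Pattern",
   "VIX", "CBOE", "FixedIncome", "CrossAsset", "Sector", "Other"]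

def gB_buckets0 : PySem.Dict String (List String) :=
  PySem.Dict.ofList (gB_order.map (fun name => (name, ([] : List String))))

-- Source B's _category helper
def gB_category (feat : String) : String :=
  let p := gB_partition_ feat
  let key := p.1 ++ "_"
  if p.2.1 == "_" && gB_prefixMap.contains key then gB_prefixMap.getD key "Other" else "Other"

def gB_step (buckets : PySem.Dict String (List String)) (feat : String) :
    PySem.Dict String (List String) :=
  buckets.modify (gB_category feat) [] (· ++ [feat])

def get_feature_categories_alt (features : List String) : List (String × List String) :=
  ((features.foldl gB_step gB_buckets0).items).filter (fun kv => !kv.2.isEmpty)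

-- ===== PRECONDITION & SPEC =====
def Spec_get_feature_categories (features : List String) (out : List (String × List String)) : Prop := out = get_feature_categories_alt features
instance (features : List String) (out : List (String × List String)) : Decidable (Spec_get_feature_categories features out) := by unfold Spec_get_feature_categories; infer_instance

-- ===== CLAIM (what is proved, stated in full; the proofs are below) =====
def Claim_equal_get_feature_categories : Prop := ∀ (features : List String), Dom_get_feature_categories features → Spec_get_feature_categories features (get_feature_categories features)

-- ===== LEMMAS AND PROOFS =====
theorem boolExt {a b : Bool} (h : a = true ↔ b = true) : a = b := by
  cases a <;> cases b <;> simp_all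

theorem boolFalse {a : Bool} (h : ¬ a = true) : a = false := by
  cases a <;> simp_all

theorem app_underscore_inj {p t : List Char} (h : p ++ ['_'] = t ++ ['_']) : p = t := by
  have := congrArg List.dropLast h
  simpa using this

theorem tw_append (p s : List Char) (hp : '_' ∉ p) :
    (p ++ '_' :: s).takeWhile (fun c => c != '_') = p := by
  induction p with
  | nil => simp
  | cons c cs ih =>
    have hc : c ≠ '_' := fun h => hp (by simp [h])
    have hp' : '_' ∉ cs := fun h => hp (List.mem_cons_of_mem _ h)
    simp [hc, ih hp']

theorem exists_split (l : List Char) (hm : '_' ∈ l) :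
    ∃ s, l = l.takeWhile (fun c => c != '_') ++ '_' :: s := by
  induction l with
  | nil => cases hm
  | cons c l' ih =>
    by_cases hc : c = '_'
    · subst hc; exact ⟨l', by simp⟩
    · have hm' : '_' ∈ l' := by
        rcases List.mem_cons.mp hm with h | h
        · exact absurd h.symm hc
        · exact h
      obtain ⟨s, hs⟩ := ih hm'
      refine ⟨s, ?_⟩
      have htw : (c :: l').takeWhile (fun c => c != '_') = c :: l'.takeWhile (fun c => c != '_') := by
        simp [hc]
      rw [htw, List.cons_append, ← hs]

theorem part_head_iff (p l : List Char) (hp : '_' ∉ p) :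
    (p ++ ['_']) <+: l ↔ ('_' ∈ l ∧ l.takeWhile (fun c => c != '_') = p) := by
  constructor
  · rintro ⟨s, rfl⟩
    rw [List.append_assoc, List.singleton_append]
    exact ⟨by simp, tw_append p s hp⟩
  · rintro ⟨hm, ht⟩
    obtain ⟨s, hs⟩ := exists_split l hm
    rw [ht] at hs
    exact ⟨s, by rw [List.append_assoc, List.singleton_append]; exact hs.symm⟩

theorem swA (feat pstr : String) (p : List Char) (hp : pstr.toList = p ++ ['_'])
    (hpn : '_' ∉ p) (hm : '_' ∈ feat.toList) :
    PySem.Str.startswith feat pstr = (feat.toList.takeWhile (fun c => c != '_') == p) := by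
  apply boolExt
  rw [PySem.Str.startswith_eq, hp, PySem.Chars.startswith_iff, beq_iff_eq,
    part_head_iff p _ hpn]
  exact ⟨And.right, fun h => ⟨hm, h⟩⟩

theorem swF (feat pstr : String) (hp : '_' ∈ pstr.toList) (hm : '_' ∉ feat.toList) :
    PySem.Str.startswith feat pstr = false := by
  apply boolFalse
  intro h
  rw [PySem.Str.startswith_eq] at h
  rw [PySem.Chars.startswith_iff] at h
  exact hm (h.subset hp)

theorem keyc (t : List Char) (pstr : String) (p : List Char) (hp : pstr.toList = p ++ ['_']) :
    (pstr == String.ofList t ++ "_") = (t == p) := by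
  apply boolExt
  rw [beq_iff_eq, beq_iff_eq, ← String.toList_inj, hp, String.toList_append,
    String.toList_ofList, show ("_" : String).toList = ['_'] from by decide]
  constructor
  · intro h; exact (app_underscore_inj h).symm
  · intro h; rw [h]

-- the category A's inner loop selects, as a recursion over the prefix table
def catList (feat : String) : List (String × String) → String
  | [] => "Other"
  | (p, c) :: rest => if PySem.Str.startswith feat p then c else catList feat rest

theorem innerA_gen (feat : String) (cats : PySem.Dict String (List String))
    (pm : List (String × String)) :
    gA_inner feat cats pm = cats.modify (catList feat pm) [] (· ++ [feat]) := by
  induction pm with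
  | nil => rfl
  | cons pc rest ih =>
    obtain ⟨p, c⟩ := pc
    simp only [gA_inner, catList]
    by_cases h : PySem.Str.startswith feat p = true
    · rw [if_pos h, if_pos h]
    · rw [if_neg h, if_neg h, ih]

-- chain forms of the two lookups, over char-list keys
def chainA (t : List Char) : List (List Char × String) → String
  | [] => "Other"
  | (p, c) :: rest => if t == p then c else chainA t rest

def chainO (t : List Char) : List (List Char × String) → Option String
  | [] => none
  | (p, c) :: rest => if t == p then some c else chainO t rest

def gPairs : List (List Char × String) :=
  [(['r','e','t'], "Returns"), (['t','r','e','n','d'], "Trend"), (['m','o','m'], "Momentum"),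
   (['v','o','l'], "Volatility"), (['v','l','m'], "Volume"), (['p','a','t'], "Pattern"),
   (['v','i','x'], "VIX"), (['c','b','o','e'], "CBOE"), (['f','i'], "FixedIncome"),
   (['x','a'], "CrossAsset"), (['s','e','c','t'], "Sector")]

theorem get?_chain (t : List Char) :
    ∀ (items : List (String × String)) (ps : List (List Char × String)),
      items.map (fun kv => kv.1.toList) = ps.map (fun pc => pc.1 ++ ['_']) →
      items.map Prod.snd = ps.map Prod.snd →
      (PySem.Dict.mk items).get? (String.ofList t ++ "_") = chainO t ps := by
  intro items
  induction items with
  | nil =>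
    intro ps h1 _
    cases ps with
    | nil => rfl
    | cons a b => simp at h1
  | cons kv rest ih =>
    intro ps h1 h2
    cases ps with
    | nil => simp at h1
    | cons pc ps' =>
      obtain ⟨k, v⟩ := kv
      obtain ⟨p, c⟩ := pc
      simp only [List.map_cons, List.cons.injEq] at h1 h2
      rw [PySem.Dict.get?_mk_cons, keyc t k p h1.1, h2.1, ih ps' h1.2 h2.2]
      simp only [chainO]

theorem chain_eq (t : List Char) (ps : List (List Char × String)) :
    chainA t ps = if (chainO t ps).isSome then (chainO t ps).getD "Other" else "Other" := by
  induction ps with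
  | nil => rfl
  | cons pc rest ih =>
    obtain ⟨p, c⟩ := pc
    by_cases h : (t == p) = true
    · simp [chainA, chainO, h]
    · simp [chainA, chainO, h, ih]

set_option maxHeartbeats 1000000 in
theorem catList_eq (feat : String) : catList feat gA_prefixItems = gB_category feat := by
  by_cases hm : '_' ∈ feat.toList
  · have hpm : gB_prefixMap = PySem.Dict.mk
      [("ret_", "Returns"), ("trend_", "Trend"), ("mom_", "Momentum"), ("vol_", "Volatility"),
       ("vlm_", "Volume"), ("pat_", "Pattern"), ("vix_", "VIX"), ("cboe_", "CBOE"),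
       ("fi_", "FixedIncome"), ("xa_", "CrossAsset"), ("sect_", "Sector")] := by decide
    have hO : gB_prefixMap.get?
        (String.ofList (feat.toList.takeWhile (fun c => c != '_')) ++ "_") =
        chainO (feat.toList.takeWhile (fun c => c != '_')) gPairs := by
      rw [hpm]
      exact get?_chain _ _ gPairs (by decide) (by decide)
    have hpart : gB_partition_ feat =
        (String.ofList (feat.toList.takeWhile (fun c => c != '_')), "_",
         String.ofList ((feat.toList.dropWhile (fun c => c != '_')).drop 1)) := by
      simp [gB_partition_, hm]
    have hA : catList feat gA_prefixItems =
        chainA (feat.toList.takeWhile (fun c => c != '_')) gPairs := by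
      simp only [gA_prefixItems, catList, gPairs, chainA,
        swA feat "ret_" ['r','e','t'] (by decide) (by decide) hm,
        swA feat "trend_" ['t','r','e','n','d'] (by decide) (by decide) hm,
        swA feat "mom_" ['m','o','m'] (by decide) (by decide) hm,
        swA feat "vol_" ['v','o','l'] (by decide) (by decide) hm,
        swA feat "vlm_" ['v','l','m'] (by decide) (by decide) hm,
        swA feat "pat_" ['p','a','t'] (by decide) (by decide) hm,
        swA feat "vix_" ['v','i','x'] (by decide) (by decide) hm,
        swA feat "cboe_" ['c','b','o','e'] (by decide) (by decide) hm,
        swA feat "fi_" ['f','i'] (by decide) (by decide) hm,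
        swA feat "xa_" ['x','a'] (by decide) (by decide) hm,
        swA feat "sect_" ['s','e','c','t'] (by decide) (by decide) hm]
    rw [hA, chain_eq]
    simp only [gB_category, hpart]
    rw [PySem.Dict.contains_eq_isSome_get?, PySem.Dict.getD_eq_get?_getD, hO]
    simp only [beq_self_eq_true, Bool.true_and]
  · have hB : gB_category feat = "Other" := by
      have he : (("" : String) == "_") = false := by decide
      simp [gB_category, gB_partition_, hm, he]
    rw [hB]
    simp only [gA_prefixItems, catList,
      swF feat "ret_" (by decide) hm,
      swF feat "trend_" (by decide) hm,
      swF feat "mom_" (by decide) hm,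
      swF feat "vol_" (by decide) hm,
      swF feat "vlm_" (by decide) hm,
      swF feat "pat_" (by decide) hm,
      swF feat "vix_" (by decide) hm,
      swF feat "cboe_" (by decide) hm,
      swF feat "fi_" (by decide) hm,
      swF feat "xa_" (by decide) hm,
      swF feat "sect_" (by decide) hm]
    simp

theorem step_eq (cats : PySem.Dict String (List String)) (feat : String) :
    gA_inner feat cats gA_prefixItems = gB_step cats feat := by
  rw [innerA_gen, catList_eq]
  rfl

-- ===== VERDICT (by name: the statement is the Claim_ definition above) =====
theorem get_feature_categories_spec : Claim_equal_get_feature_categories := by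
  intro features _
  unfold Spec_get_feature_categories get_feature_categories get_feature_categories_alt
  have h0 : gA_cats0 = gB_buckets0 := by decide
  have hf : (fun (cats : PySem.Dict String (List String)) (feat : String) =>
      gA_inner feat cats gA_prefixItems) = gB_step :=
    funext fun cats => funext fun feat => step_eq cats feat
  rw [h0, hf]
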